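-- pv_equiv track=rewrite | github.com/Tallefer/jabrss | webrss/urlrewriter.py | pattern_to_regex
-- ===== SOURCE A (Python) =====
-- ranges = {
--     'a' : 'a-zA-Z',
--     'd' : '0-9',
--     'l' : 'a-z',
--     'u' : 'A-Z',
--     'w' : '0-9a-zA-Z',
-- }
--
-- def pattern_to_regex(pattern):
--     result = []
--
--     inset, escaped = False, False
--
--     for c in pattern:
--         if escaped:
--             repl = ranges.get(c, c)
--
--             if not inset:
--                 repl = '[' + repl + ']'
--
--             result.append(repl)
--             escaped = False
--         elif c == '%':
--             escaped = True
--         elif c == '[':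
--             inset = True
--             result.append(c)
--         elif c == ']':
--             inset = False
--             result.append(c)
--         elif c == '\\':
--             result.append('\\\\')
--         else:
--             result.append(c)
--
--     return '^' + ''.join(result) + '$'
-- ===== SOURCE B (Python) =====
-- ranges = {
--     'a' : 'a-zA-Z',
--     'd' : '0-9',
--     'l' : 'a-z',
--     'u' : 'A-Z',
--     'w' : '0-9a-zA-Z',
-- }
--
-- def _literal(text, inset):
--     # translate a %-free chunk; returns (pieces, final inset flag)
--     out = []
--     for c in text:
--         if c == '[':
--             inset = True
--             out.append(c)
--         elif c == ']':
--             inset = False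
--             out.append(c)
--         elif c == '\\':
--             out.append('\\\\')
--         else:
--             out.append(c)
--     return out, inset
--
-- def pattern_to_regex(pattern):
--     # staged: split on '%' first, then walk the chunks
--     parts = pattern.split('%')
--     pieces, inset = _literal(parts[0], False)
--     i = 1
--     while i < len(parts):
--         part = parts[i]
--         if part:
--             c, rest, i = part[0], part[1:], i + 1
--         elif i + 1 < len(parts):
--             c, rest, i = '%', parts[i + 1], i + 2
--         else:
--             break  # pattern ends with a lone '%': the escape consumes nothing
--         r = ranges.get(c, c)
--         pieces.append(r if inset else '[' + r + ']')
--         more, inset = _literal(rest, inset)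
--         pieces.extend(more)
--     return '^' + ''.join(pieces) + '$'
-- ===== Notes on version B (the rewrite author's own statement) =====
-- stated objective: alternative
-- what changed: B is staged: it first splits the pattern on '%' into chunks, then walks the chunk list, translating each %-free chunk with a separate literal pass and turning each chunk boundary into one escape replacement, instead of A's single character loop with a cross-iteration escaped flag.
import Mathlib
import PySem

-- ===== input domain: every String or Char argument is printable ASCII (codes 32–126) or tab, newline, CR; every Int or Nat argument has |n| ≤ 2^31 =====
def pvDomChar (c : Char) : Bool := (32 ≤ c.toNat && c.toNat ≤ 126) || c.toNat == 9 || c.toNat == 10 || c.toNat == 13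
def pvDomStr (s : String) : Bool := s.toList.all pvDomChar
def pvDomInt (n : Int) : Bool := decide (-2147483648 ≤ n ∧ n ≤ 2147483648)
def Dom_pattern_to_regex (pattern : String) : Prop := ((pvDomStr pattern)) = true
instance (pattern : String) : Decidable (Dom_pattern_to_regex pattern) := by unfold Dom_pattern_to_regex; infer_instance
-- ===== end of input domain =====

-- B is staged: split the pattern on '%' first, then walk the chunk list (objective: alternative).

-- ranges.get(c, c) from the module-level dict (shared constant of both programs)
def rangesGet (c : Char) : String :=
  if c = 'a' then "a-zA-Z"
  else if c = 'd' then "0-9"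
  else if c = 'l' then "a-z"
  else if c = 'u' then "A-Z"
  else if c = 'w' then "0-9a-zA-Z"
  else String.mk [c]

-- ===== PORT A =====
-- A's for-loop over pattern with state (result, inset, escaped)
def aGo : List Char → List String → Bool → Bool → List String
  | [], res, _, _ => res
  | c :: cs, res, inset, escaped =>
    if escaped then
      let repl := rangesGet c
      let repl := if !inset then "[" ++ repl ++ "]" else repl
      aGo cs (res ++ [repl]) inset false
    else if c = '%' then aGo cs res inset true
    else if c = '[' then aGo cs (res ++ [String.mk [c]]) true escaped
    else if c = ']' then aGo cs (res ++ [String.mk [c]]) false escaped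
    else if c = '\\' then aGo cs (res ++ ["\\\\"]) inset escaped
    else aGo cs (res ++ [String.mk [c]]) inset escaped

def pattern_to_regex (pattern : String) : String :=
  "^" ++ String.join (aGo pattern.toList [] false false) ++ "$"

-- ===== PORT B =====
-- pattern.split('%'), ported by hand (exact for a one-character separator):
-- returns the first chunk and the list of remaining chunks (the result is never empty)
def splitPct : List Char → List Char × List (List Char)
  | [] => ([], [])
  | c :: cs =>
    let r := splitPct cs
    if c = '%' then ([], r.1 :: r.2) else (c :: r.1, r.2)

-- _literal(text, inset): translate a %-free chunk, returning (pieces, final inset flag)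
def litGo : List Char → Bool → List String × Bool
  | [], inset => ([], inset)
  | c :: cs, inset =>
    if c = '[' then
      let r := litGo cs true; (String.mk [c] :: r.1, r.2)
    else if c = ']' then
      let r := litGo cs false; (String.mk [c] :: r.1, r.2)
    else if c = '\\' then
      let r := litGo cs inset; ("\\\\" :: r.1, r.2)
    else
      let r := litGo cs inset; (String.mk [c] :: r.1, r.2)

-- the while loop over parts[1:]: each step consumes one escape (chunk boundary) plus its chunk
def bLoop : List (List Char) → Bool → List String
  | [], _ => []
  | p :: ps, inset =>
    match p, ps with
    | c :: rest, ps =>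
      let w := rangesGet c
      let r := litGo rest inset
      (if inset then w else "[" ++ w ++ "]") :: (r.1 ++ bLoop ps r.2)
    | [], p2 :: ps' =>
      let w := rangesGet '%'
      let r := litGo p2 inset
      (if inset then w else "[" ++ w ++ "]") :: (r.1 ++ bLoop ps' r.2)
    | [], [] => []   -- pattern ends with a lone '%': the escape consumes nothing

def pattern_to_regex_alt (pattern : String) : String :=
  let parts := splitPct pattern.toList
  let r := litGo parts.1 false
  "^" ++ String.join (r.1 ++ bLoop parts.2 r.2) ++ "$"

-- ===== PRECONDITION & SPEC =====
def Spec_pattern_to_regex (pattern : String) (out : String) : Prop := out = pattern_to_regex_alt pattern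
instance (pattern : String) (out : String) : Decidable (Spec_pattern_to_regex pattern out) := by unfold Spec_pattern_to_regex; infer_instance

-- ===== CLAIM (what is proved, stated in full; the proofs are below) =====
def Claim_equal_pattern_to_regex : Prop := ∀ (pattern : String), Dom_pattern_to_regex pattern → Spec_pattern_to_regex pattern (pattern_to_regex pattern)

-- ===== LEMMAS AND PROOFS =====

-- reconstruct the original list from the chunks
def flatPct : List (List Char) → List Char
  | [] => []
  | p :: ps => '%' :: (p ++ flatPct ps)

theorem splitPct_flat : ∀ cs : List Char, (splitPct cs).1 ++ flatPct (splitPct cs).2 = cs := by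
  intro cs
  induction cs with
  | nil => simp [splitPct, flatPct]
  | cons c cs ih =>
    by_cases h : c = '%' <;> simp [splitPct, h, flatPct, ih]

theorem splitPct_noPct : ∀ cs : List Char,
    '%' ∉ (splitPct cs).1 ∧ ∀ p ∈ (splitPct cs).2, '%' ∉ p := by
  intro cs
  induction cs with
  | nil => simp [splitPct]
  | cons c cs ih =>
    by_cases h : c = '%'
    · simpa [splitPct, h] using ih
    · simp [splitPct, h]
      refine ⟨⟨fun hc => h hc.symm, ih.1⟩, ih.2⟩

-- A's loop over a %-free chunk behaves like _literal
theorem aGo_lit : ∀ (p : List Char), '%' ∉ p → ∀ (rest : List Char) (res : List String) (inset : Bool),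
    aGo (p ++ rest) res inset false = aGo rest (res ++ (litGo p inset).1) (litGo p inset).2 false := by
  intro p
  induction p with
  | nil => intro _ rest res inset; simp [litGo]
  | cons c p ih =>
    intro hnp rest res inset
    have hc : c ≠ '%' := by simp at hnp; exact fun h => hnp.1 h.symm
    have hp : '%' ∉ p := by simp at hnp; exact hnp.2
    by_cases h1 : c = '['
    · simp [aGo, litGo, h1, ih hp]
    · by_cases h2 : c = ']'
      · simp [aGo, litGo, h2, ih hp]
      · by_cases h3 : c = '\\'
        · simp [aGo, litGo, h3, ih hp]
        · simp [aGo, litGo, h1, h2, h3, hc, ih hp]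

-- A's loop over the flattened tail chunks behaves like B's while loop
theorem aGo_bLoop : ∀ (ps : List (List Char)) (inset : Bool), (∀ p ∈ ps, '%' ∉ p) →
    ∀ (res : List String), aGo (flatPct ps) res inset false = res ++ bLoop ps inset := by
  intro ps inset h
  fun_induction bLoop ps inset with
  | case1 => intro res; simp [flatPct, aGo]
  | case2 inset c rest ps w r ih =>
    intro res
    have hrest : '%' ∉ rest := fun hm => (h _ (List.mem_cons_self)) (List.mem_cons_of_mem _ hm)
    have hps : ∀ p ∈ ps, '%' ∉ p := fun p hp => h p (List.mem_cons_of_mem _ hp)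
    have hc : c ≠ '%' := fun hc => (h _ (List.mem_cons_self)) (hc ▸ List.mem_cons_self)
    show aGo ('%' :: ((c :: rest) ++ flatPct ps)) res inset false = _
    rw [show ('%' :: ((c :: rest) ++ flatPct ps)) = '%' :: c :: (rest ++ flatPct ps) by simp]
    simp only [aGo, if_neg hc, Bool.false_eq_true, if_false, if_true]
    rw [aGo_lit rest hrest, ih hps]
    cases inset <;> simp [w, r]
  | case3 inset p2 ps' w r ih =>
    intro res
    have hp2 : '%' ∉ p2 := h _ (List.mem_cons_of_mem _ List.mem_cons_self)
    have hps : ∀ p ∈ ps', '%' ∉ p := fun p hp => h p (List.mem_cons_of_mem _ (List.mem_cons_of_mem _ hp))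
    show aGo ('%' :: ([] ++ flatPct (p2 :: ps'))) res inset false = _
    rw [show ('%' :: ([] ++ flatPct (p2 :: ps'))) = '%' :: '%' :: (p2 ++ flatPct ps') by simp [flatPct]]
    simp only [aGo, Bool.false_eq_true, if_false, if_true]
    rw [aGo_lit p2 hp2, ih hps]
    cases inset <;> simp [w, r]
  | case4 inset =>
    intro res
    simp [flatPct, aGo]

-- ===== VERDICT (by name: the statement is the Claim_ definition above) =====
theorem pattern_to_regex_spec : Claim_equal_pattern_to_regex := by
  intro pattern _
  unfold Spec_pattern_to_regex pattern_to_regex pattern_to_regex_alt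
  have hflat := splitPct_flat pattern.toList
  have hnp := splitPct_noPct pattern.toList
  conv_lhs => rw [← hflat]
  rw [aGo_lit _ hnp.1, aGo_bLoop _ _ hnp.2]
  simp
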